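-- pv_equiv track=rewrite | github.com/qinghui1005/art_check | art_chain.py | col_chain
-- ===== SOURCE A (Python) =====
-- from collections import defaultdict
--
-- def col_chain(fname_src, ref_all):
-- 	ret, zee = defaultdict(set), []
-- 	if len(ref_all) == 0:return ret
-- 	if fname_src not in ref_all:return {fname_src:set()}
--
-- 	for fname in ref_all[fname_src]:
-- 		if fname not in ref_all or len(ref_all[fname]) == 0:
-- 			ret[fname_src].add(ref_text(fname_src, fname))
-- 			continue
--
-- 		result = walk_ref(ref_all, ref_text(fname_src, fname), ref_all[fname])
-- 		for r in result:
-- 			r_src, r_neo = r.split('\t')[0], r.split('\t')[1:]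
-- 			ret[r_src].add(r)
-- 			zee.extend(r_neo)
--
-- 	for z in zee:
-- 		if z not in ret:continue
-- 		ret.pop(z)
--
-- 	return ret
--
-- def ref_text(pfile, cfile):return pfile + '\t' + cfile
--
-- def walk_ref(ref_all, fname, ref_sub):
-- 	if len(ref_sub) == 0:
-- 		yield ref_text(fname, '')
-- 	else:
-- 		for ref in ref_sub:
-- 			if ref in ref_all:
-- 				for text in walk_ref(ref_all, ref_text(fname, ref), ref_all[ref]):yield text
-- 			else:
-- 				yield ref_text(fname, ref)
-- ===== SOURCE B (Python) =====
-- def col_chain(fname_src, ref_all):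
--     if len(ref_all) == 0:
--         return {}
--     if fname_src not in ref_all:
--         return {fname_src: set()}
--
--     ret, zee = {}, []
--     for fname in ref_all[fname_src]:
--         if fname not in ref_all or len(ref_all[fname]) == 0:
--             ret.setdefault(fname_src, set()).add(fname_src + '\t' + fname)
--             continue
--         # iterative DFS over (prefix, child) frames replacing the recursive generator
--         stack = [(fname_src + '\t' + fname, c) for c in reversed(list(ref_all[fname]))]
--         while stack:
--             prefix, c = stack.pop()
--             kids = ref_all.get(c)
--             if kids is not None and len(kids) > 0:
--                 newp = prefix + '\t' + c
--                 stack.extend((newp, k) for k in reversed(list(kids)))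
--                 continue
--             path = prefix + '\t' + c if kids is None else prefix + '\t' + c + '\t'
--             parts = path.split('\t')
--             ret.setdefault(parts[0], set()).add(path)
--             zee.extend(parts[1:])
--
--     return {k: v for k, v in ret.items() if k not in zee}
-- ===== Notes on version B (the rewrite author's own statement) =====
-- stated objective: alternative
-- what changed: The recursive generator walk_ref is replaced by an explicit stack-based DFS loop over (prefix, child) frames that processes each finished path immediately, and the final zee-driven pop loop is replaced by a single dict-comprehension filter.
-- outside the precondition, e.g. on col_chain('a', {'a': {'a'}}): A raises RecursionError, B does not finish within the time limit
import Mathlib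
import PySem

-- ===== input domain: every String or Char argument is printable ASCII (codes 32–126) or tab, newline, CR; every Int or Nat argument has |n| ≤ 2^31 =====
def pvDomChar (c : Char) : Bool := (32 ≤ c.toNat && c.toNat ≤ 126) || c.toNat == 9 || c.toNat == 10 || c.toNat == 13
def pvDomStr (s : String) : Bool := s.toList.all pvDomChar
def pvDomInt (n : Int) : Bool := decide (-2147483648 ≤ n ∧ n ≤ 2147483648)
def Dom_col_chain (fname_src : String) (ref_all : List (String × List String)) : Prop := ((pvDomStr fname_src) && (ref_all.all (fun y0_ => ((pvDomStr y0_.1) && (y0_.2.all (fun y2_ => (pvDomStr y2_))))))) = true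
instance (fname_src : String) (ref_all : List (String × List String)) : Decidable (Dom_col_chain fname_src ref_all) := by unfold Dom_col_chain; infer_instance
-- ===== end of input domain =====

-- B replaces A's recursive generator walk_ref by an explicit stack-based DFS loop and the
-- zee-driven pop loop by a single filter over the finished dict (objective: alternative
-- decomposition, same cost). Equivalence is claimed on acyclic reference graphs (Pre_);
-- on cyclic ones Python A raises RecursionError (and B's loop does not terminate).

-- shared helper: r.split('\t'); the separator is the non-empty literal "\t", so split? is always some
def pySplitTab (r : String) : List String := (PySem.Str.split? r "\t").getD [r]

-- ===== PORT A =====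
def ref_text (pfile cfile : String) : String := pfile ++ "\t" ++ cfile

-- Python's recursive generator, collected into the list of yielded strings.
-- fuel is only a totality guard (the recursion depth): inside Pre_ the chains are acyclic and
-- depth ≤ ref_all.length + 2 at every call site, so the guard is never hit.
def walk_ref (fuel : Nat) (ref_all : List (String × List String)) (fname : String) (ref_sub : List String) : List String :=
  match fuel with
  | 0 => []
  | f + 1 =>
    if ref_sub.length = 0 then [ref_text fname ""]
    else
      ref_sub.foldl (fun acc ref =>
        match ref_all.lookup ref with
        | some kids => acc ++ walk_ref f ref_all (ref_text fname ref) kids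
        | none => acc ++ [ref_text fname ref]) []

def col_chain (fname_src : String) (ref_all : List (String × List String)) : List (String × List String) :=
  let ret0 : PySem.Dict String (PySem.Set String) := PySem.Dict.empty
  let zee0 : List String := []
  if ref_all.length = 0 then ret0.items else
  match ref_all.lookup fname_src with
  | none => [(fname_src, [])]
  | some children =>
    let st :=
      children.foldl (fun st fname =>
        match ref_all.lookup fname with
        | none =>
          (st.1.modify fname_src [] (fun s => PySem.Set.add s (ref_text fname_src fname)), st.2)
        | some kids =>
          if kids.length = 0 then
            (st.1.modify fname_src [] (fun s => PySem.Set.add s (ref_text fname_src fname)), st.2)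
          else
            (walk_ref (ref_all.length + 2) ref_all (ref_text fname_src fname) kids).foldl
              (fun st r =>
                (st.1.modify ((pySplitTab r).headD "") [] (fun s => PySem.Set.add s r),
                 st.2 ++ (pySplitTab r).tail)) st) (ret0, zee0)
    (st.2.foldl (fun d z => if d.contains z then d.erase z else d) st.1).items

-- ===== PORT B =====
-- fuel bound for the DFS loop (a totality guard only: number of frames ever popped)
def cnt (fuel : Nat) (ref_all : List (String × List String)) (c : String) : Nat :=
  match fuel with
  | 0 => 1
  | f + 1 =>
    match ref_all.lookup c with
    | none => 1
    | some kids => if kids.isEmpty then 1 else 1 + (kids.map (cnt f ref_all)).sum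

-- process one finished path string: split, setdefault-add, extend zee
def procPath (r : String) (st : PySem.Dict String (PySem.Set String) × List String) :
    PySem.Dict String (PySem.Set String) × List String :=
  (st.1.modify ((pySplitTab r).headD "") [] (fun s => PySem.Set.add s r),
   st.2 ++ (pySplitTab r).tail)

-- the while-loop over (prefix, child) frames; head of the list = top of Python's stack
-- (Python pushes the children reversed and pops from the end; prepending them in order is the same)
def dfsLoop (fuel : Nat) (ref_all : List (String × List String))
    (stack : List (String × String))
    (st : PySem.Dict String (PySem.Set String) × List String) :
    PySem.Dict String (PySem.Set String) × List String :=
  match fuel, stack with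
  | _, [] => st
  | 0, _ => st  -- fuel guard, never reached inside Pre_
  | f + 1, (p, c) :: stack =>
    match ref_all.lookup c with
    | some kids =>
      if kids.isEmpty then dfsLoop f ref_all stack (procPath (p ++ "\t" ++ c ++ "\t") st)
      else dfsLoop f ref_all (kids.map (fun k => (p ++ "\t" ++ c, k)) ++ stack) st
    | none => dfsLoop f ref_all stack (procPath (p ++ "\t" ++ c) st)

def col_chain_alt (fname_src : String) (ref_all : List (String × List String)) : List (String × List String) :=
  if ref_all.isEmpty then [] else
  match ref_all.lookup fname_src with
  | none => [(fname_src, [])]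
  | some children =>
    let st :=
      children.foldl (fun st fname =>
        match ref_all.lookup fname with
        | some kids =>
          if kids.isEmpty then
            (st.1.modify fname_src [] (fun s => PySem.Set.add s (fname_src ++ "\t" ++ fname)), st.2)
          else
            dfsLoop ((kids.map (cnt (ref_all.length + 1) ref_all)).sum) ref_all
              (kids.map (fun c => (fname_src ++ "\t" ++ fname, c))) st
        | none =>
          (st.1.modify fname_src [] (fun s => PySem.Set.add s (fname_src ++ "\t" ++ fname)), st.2))
        (PySem.Dict.empty, [])
    st.1.items.filter (fun kv => !(st.2.contains kv.1))

-- ===== PRECONDITION & SPEC =====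
-- okRef f c: every reference chain starting at c terminates within f steps
def okRef (fuel : Nat) (ref_all : List (String × List String)) (c : String) : Bool :=
  match fuel with
  | 0 => (ref_all.lookup c).isNone
  | f + 1 =>
    match ref_all.lookup c with
    | none => true
    | some kids => kids.all (okRef f ref_all)

-- Pre_ excludes exactly the inputs with a reference cycle reachable from fname_src (a chain
-- from fname_src longer than the number of keys): there Python A's recursive walk raises
-- RecursionError. Cycles not reachable from fname_src are harmless and stay inside Pre_.
def Pre_col_chain (fname_src : String) (ref_all : List (String × List String)) : Prop :=
  okRef (ref_all.length + 1) ref_all fname_src = true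
instance (fname_src : String) (ref_all : List (String × List String)) : Decidable (Pre_col_chain fname_src ref_all) := by unfold Pre_col_chain; infer_instance

def pvWitness_col_chain : String × (List (String × List String)) := ("a", [("a", ["b"]), ("b", [])])

def Spec_col_chain (fname_src : String) (ref_all : List (String × List String)) (out : List (String × List String)) : Prop := out = col_chain_alt fname_src ref_all
instance (fname_src : String) (ref_all : List (String × List String)) (out : List (String × List String)) : Decidable (Spec_col_chain fname_src ref_all out) := by unfold Spec_col_chain; infer_instance

-- ===== CLAIM (what is proved, stated in full; the proofs are below) =====
def Claim_equal_col_chain : Prop := ∀ (fname_src : String) (ref_all : List (String × List String)), Dom_col_chain fname_src ref_all → Pre_col_chain fname_src ref_all → Spec_col_chain fname_src ref_all (col_chain fname_src ref_all)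

-- ===== LEMMAS AND PROOFS =====

theorem okRef_succ {ref_all : List (String × List String)} :
    ∀ {f : Nat} {c : String}, okRef f ref_all c = true → okRef (f + 1) ref_all c = true := by
  
  intro f
  induction f with
  | zero =>
    intro c h
    replace h : (ref_all.lookup c).isNone = true := h
    rw [Option.isNone_iff_eq_none] at h
    simp [okRef, h]
  | succ f ih =>
    intro c h
    simp only [okRef] at h ⊢
    cases hl : ref_all.lookup c with
    | none => simp
    | some kids =>
      rw [hl] at h
      simp only [List.all_eq_true] at h ⊢
      exact fun k hk => ih (h k hk)

theorem okRef_le {ref_all : List (String × List String)} {f g : Nat} {c : String}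
    (hfg : f ≤ g) (h : okRef f ref_all c = true) : okRef g ref_all c = true := by
  
  induction g with
  | zero => cases Nat.le_zero.mp hfg; exact h
  | succ g ih =>
    rcases Nat.lt_or_ge f (g+1) with hlt | hge
    · exact okRef_succ (ih (Nat.lt_succ_iff.mp hlt) )
    · cases Nat.le_antisymm hfg hge; exact h

theorem cnt_stable {ref_all : List (String × List String)} :
    ∀ {f : Nat} {c : String} (g : Nat), f ≤ g → okRef f ref_all c = true →
      cnt g ref_all c = cnt f ref_all c := by
  
  intro f
  induction f with
  | zero =>
    intro c g _ h
    replace h : (ref_all.lookup c).isNone = true := h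
    rw [Option.isNone_iff_eq_none] at h
    cases g with
    | zero => rfl
    | succ g => simp [cnt, h]
  | succ f ih =>
    intro c g hg h
    cases g with
    | zero => omega
    | succ g =>
      simp only [cnt]
      cases hl : ref_all.lookup c with
      | none => rfl
      | some kids =>
        simp only [okRef, hl, List.all_eq_true] at h
        by_cases he : kids.isEmpty
        · simp [he]
        · simp only [he]
          have hmap : List.map (cnt g ref_all) kids = List.map (cnt f ref_all) kids :=
            List.map_congr_left (fun k hk => ih g (Nat.succ_le_succ_iff.mp hg) (h k hk))
          rw [hmap]

theorem cnt_pos {ref_all : List (String × List String)} (f : Nat) (c : String) :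
    1 ≤ cnt f ref_all c := by
  
  cases f with
  | zero => simp [cnt]
  | succ f =>
    simp only [cnt]
    cases ref_all.lookup c with
    | none => simp
    | some kids =>
      by_cases he : kids.isEmpty <;> simp [he]

-- proof-side description of one DFS frame's emissions
def emitFrame (f : Nat) (ref_all : List (String × List String)) (p c : String) : List String :=
  match ref_all.lookup c with
  | none => [ref_text p c]
  | some kids => walk_ref f ref_all (ref_text p c) kids

theorem walk_succ_flatMap {ref_all : List (String × List String)} {f : Nat} {p : String}
    {ref_sub : List String} (h : ref_sub ≠ []) :
    walk_ref (f + 1) ref_all p ref_sub = ref_sub.flatMap (fun ref => emitFrame f ref_all p ref) := by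
  
  have hlen : ¬ ref_sub.length = 0 := by simpa [List.length_eq_zero_iff] using h
  simp only [walk_ref, hlen, if_false]
  have hfun : (fun (acc : List String) ref =>
      match ref_all.lookup ref with
      | some kids => acc ++ walk_ref f ref_all (ref_text p ref) kids
      | none => acc ++ [ref_text p ref])
      = fun acc ref => acc ++ emitFrame f ref_all p ref := by
    funext acc ref
    cases hl : ref_all.lookup ref <;> simp [emitFrame, hl]
  rw [hfun, PySem.List.foldl_append_eq_flatMap, List.nil_append]

theorem emit_stable {ref_all : List (String × List String)} :
    ∀ {f : Nat} {c : String} (g : Nat) (p : String), f ≤ g → okRef f ref_all c = true →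
      emitFrame g ref_all p c = emitFrame f ref_all p c := by
  
  intro f
  induction f with
  | zero =>
    intro c g p _ h
    replace h : (ref_all.lookup c).isNone = true := h
    rw [Option.isNone_iff_eq_none] at h
    simp [emitFrame, h]
  | succ f ih =>
    intro c g p hg h
    cases g with
    | zero => omega
    | succ g =>
      cases hl : ref_all.lookup c with
      | none => simp [emitFrame, hl]
      | some kids =>
        simp only [emitFrame, hl]
        simp only [okRef, hl, List.all_eq_true] at h
        rcases List.eq_nil_or_concat kids with hk | _
        · subst hk; simp [walk_ref]
        · have hne : kids ≠ [] := by rintro rfl; simp_all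
          rw [walk_succ_flatMap hne, walk_succ_flatMap hne]
          have hx : ∀ x ∈ kids, emitFrame g ref_all (ref_text p c) x = emitFrame f ref_all (ref_text p c) x :=
            fun x hx => ih g (ref_text p c) (Nat.succ_le_succ_iff.mp hg) (h x hx)
          rw [List.flatMap_def, List.flatMap_def, List.map_congr_left hx]

theorem dfsLoop_eq_foldl_emit {ref_all : List (String × List String)} {fa : Nat} :
    ∀ (fb : Nat) (stack : List (String × String))
      (st : PySem.Dict String (PySem.Set String) × List String),
      (∀ pc ∈ stack, okRef fa ref_all pc.2 = true) →
      (stack.map (fun pc => cnt fa ref_all pc.2)).sum ≤ fb →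
      dfsLoop fb ref_all stack st
        = (stack.flatMap (fun pc => emitFrame fa ref_all pc.1 pc.2)).foldl
            (fun s r => procPath r s) st := by
  
  intro fb
  induction fb with
  | zero =>
    intro stack st hok hsum
    cases stack with
    | nil => simp [dfsLoop]
    | cons pc rest =>
      exfalso
      have := cnt_pos (ref_all := ref_all) fa pc.2
      simp [List.map_cons] at hsum
      omega
  | succ fb ih =>
    intro stack st hok hsum
    cases stack with
    | nil => simp [dfsLoop]
    | cons pc rest =>
      obtain ⟨p, c⟩ := pc
      have hokc : okRef fa ref_all c = true := hok (p, c) (List.mem_cons_self)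
      have hokr : ∀ pc ∈ rest, okRef fa ref_all pc.2 = true :=
        fun pc hpc => hok pc (List.mem_cons_of_mem _ hpc)
      cases hl : ref_all.lookup c with
      | none =>
        have hc1 : cnt fa ref_all c = 1 := by cases fa <;> simp [cnt, hl]
        have hemit : emitFrame fa ref_all p c = [p ++ "\t" ++ c] := by
          simp [emitFrame, hl, ref_text]
        simp only [dfsLoop, hl]
        rw [ih rest (procPath (p ++ "\t" ++ c) st) hokr (by simp [List.map_cons, hc1] at hsum; omega)]
        rw [List.flatMap_cons, hemit, List.foldl_append]
        rfl
      | some kids =>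
        cases fa with
        | zero =>
          exfalso
          replace hokc : (ref_all.lookup c).isNone = true := hokc
          rw [hl] at hokc; simp at hokc
        | succ fa' =>
          have hokkids : ∀ k ∈ kids, okRef fa' ref_all k = true := by
            replace hokc : okRef (fa' + 1) ref_all c = true := hokc
            simp only [okRef, hl, List.all_eq_true] at hokc
            exact hokc
          by_cases he : kids.isEmpty
          · have hk : kids = [] := by simpa [List.isEmpty_iff] using he
            subst hk
            have hc1 : cnt (fa' + 1) ref_all c = 1 := by simp [cnt, hl]
            have hemit : emitFrame (fa' + 1) ref_all p c = [p ++ "\t" ++ c ++ "\t"] := by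
              simp [emitFrame, hl, walk_ref, ref_text]
            simp only [dfsLoop, hl, List.isEmpty_nil, if_true]
            rw [ih rest (procPath (p ++ "\t" ++ c ++ "\t") st) hokr
              (by simp [List.map_cons, hc1] at hsum; omega)]
            rw [List.flatMap_cons, hemit, List.foldl_append]
            rfl
          · have hne : kids ≠ [] := by simpa [List.isEmpty_iff] using he
            have hcc : cnt (fa' + 1) ref_all c = 1 + (kids.map (cnt fa' ref_all)).sum := by
              simp [cnt, hl, he]
            have hstab : List.map (cnt (fa' + 1) ref_all) kids = List.map (cnt fa' ref_all) kids :=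
              List.map_congr_left (fun k hk =>
                cnt_stable (fa' + 1) (Nat.le_succ fa') (hokkids k hk))
            simp only [dfsLoop, hl, he]
            rw [ih (kids.map (fun k => (p ++ "\t" ++ c, k)) ++ rest) st
              (by
                intro pc hpc
                rcases List.mem_append.mp hpc with hmem | hmem
                · obtain ⟨k, hk, rfl⟩ := List.mem_map.mp hmem
                  exact okRef_le (Nat.le_succ fa') (hokkids k hk)
                · exact hokr pc hmem)
              (by
                simp only [List.map_append, List.sum_append, List.map_map]
                have : List.map ((fun pc => cnt (fa' + 1) ref_all pc.2) ∘ fun k => (p ++ "\t" ++ c, k)) kids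
                    = List.map (cnt fa' ref_all) kids := by
                  rw [show ((fun pc => cnt (fa' + 1) ref_all pc.2) ∘ fun k => (p ++ "\t" ++ c, k))
                      = cnt (fa' + 1) ref_all from rfl, hstab]
                rw [this]
                simp only [List.map_cons, List.sum_cons, hcc] at hsum
                omega)]
            rw [List.flatMap_append, List.flatMap_cons]
            have hemit : emitFrame (fa' + 1) ref_all p c
                = (kids.map (fun k => (p ++ "\t" ++ c, k))).flatMap
                    (fun pc => emitFrame (fa' + 1) ref_all pc.1 pc.2) := by
              have h1 : emitFrame (fa' + 1) ref_all p c
                  = kids.flatMap (fun k => emitFrame fa' ref_all (ref_text p c) k) := by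
                simp only [emitFrame, hl]
                exact walk_succ_flatMap hne
              have h2 : ∀ k ∈ kids, emitFrame fa' ref_all (ref_text p c) k
                  = emitFrame (fa' + 1) ref_all (ref_text p c) k :=
                fun k hk => (emit_stable (fa' + 1) (ref_text p c) (Nat.le_succ fa') (hokkids k hk)).symm
              rw [h1, List.flatMap_def, List.map_congr_left h2, ← List.flatMap_def]
              rw [List.flatMap_def, List.flatMap_def, List.map_map]
              rfl
            rw [hemit]
            simp

theorem erase_not_contains {d : PySem.Dict String (PySem.Set String)} {z : String}
    (h : d.contains z = false) : d.erase z = d := by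
  
  cases d with
  | mk its =>
    simp only [PySem.Dict.contains, List.any_eq_false] at h
    simp only [PySem.Dict.erase]
    congr 1
    apply List.filter_eq_self.mpr
    intro p hp
    simpa using h p hp

theorem prune_items :
    ∀ (zee : List String) (d : PySem.Dict String (PySem.Set String)),
      (zee.foldl (fun d z => if d.contains z then d.erase z else d) d).items
        = d.items.filter (fun kv => !(zee.contains kv.1)) := by
  
  intro zee
  induction zee with
  | nil => intro d; simp
  | cons z zs ih =>
    intro d
    have hstep : (if d.contains z then d.erase z else d) = d.erase z := by
      cases hc : d.contains z
      · simp [erase_not_contains hc]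
      · simp
    simp only [List.foldl_cons, hstep]
    rw [ih]
    rw [show (d.erase z).items = d.items.filter (fun p => !(p.1 == z)) from rfl]
    rw [List.filter_filter]
    apply List.filter_congr
    intro kv _
    simp only [List.contains_cons]
    cases hz : (kv.1 == z) <;> cases hzs : zs.contains kv.1 <;> simp

-- ===== VERDICT (by name: the statement is the Claim_ definition above) =====
theorem col_chain_spec : Claim_equal_col_chain := by
  
  intro fname_src ref_all _ hpre
  unfold Pre_col_chain at hpre
  unfold Spec_col_chain col_chain col_chain_alt
  by_cases h0 : ref_all.length = 0
  · have h0' : ref_all.isEmpty = true := by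
      simp [← List.length_eq_zero_iff, h0]
    simp [h0, h0', PySem.Dict.empty]
  · have h0' : ref_all.isEmpty = false := by
      simp [← List.length_eq_zero_iff, h0]
    simp only [h0, if_false, h0', Bool.false_eq_true]
    cases hsrc : ref_all.lookup fname_src with
    | none => rfl
    | some children =>
      dsimp only
      have hch : ∀ fname ∈ children, okRef ref_all.length ref_all fname = true := by
        replace hpre : okRef (ref_all.length + 1) ref_all fname_src = true := hpre
        simp only [okRef, hsrc, List.all_eq_true] at hpre
        exact hpre
      have hfold : ∀ (init : PySem.Dict String (PySem.Set String) × List String),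
          children.foldl (fun (st : PySem.Dict String (PySem.Set String) × List String) fname =>
          match ref_all.lookup fname with
          | none =>
            (st.1.modify fname_src [] (fun s => PySem.Set.add s (ref_text fname_src fname)), st.2)
          | some kids =>
            if kids.length = 0 then
              (st.1.modify fname_src [] (fun s => PySem.Set.add s (ref_text fname_src fname)), st.2)
            else
              (walk_ref (ref_all.length + 2) ref_all (ref_text fname_src fname) kids).foldl
                (fun st r =>
                  (st.1.modify ((pySplitTab r).headD "") [] (fun s => PySem.Set.add s r),
                   st.2 ++ (pySplitTab r).tail)) st) init
          = children.foldl (fun (st : PySem.Dict String (PySem.Set String) × List String) fname =>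
          match ref_all.lookup fname with
          | some kids =>
            if kids.isEmpty then
              (st.1.modify fname_src [] (fun s => PySem.Set.add s (fname_src ++ "\t" ++ fname)), st.2)
            else
              dfsLoop ((kids.map (cnt (ref_all.length + 1) ref_all)).sum) ref_all
                (kids.map (fun c => (fname_src ++ "\t" ++ fname, c))) st
          | none =>
            (st.1.modify fname_src [] (fun s => PySem.Set.add s (fname_src ++ "\t" ++ fname)), st.2)) init := by
        intro init
        apply PySem.List.foldl_congr_mem
        intro st fname hmem
        have hokf : okRef ref_all.length ref_all fname = true := hch fname hmem
        cases hl : ref_all.lookup fname with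
        | none => rfl
        | some kids =>
          cases kids with
          | nil => rfl
          | cons k ks =>
            simp only [List.length_cons, List.isEmpty_cons, Nat.succ_ne_zero, if_false]
            have hok : ∀ pc ∈ (k :: ks).map (fun c => (fname_src ++ "\t" ++ fname, c)),
                okRef (ref_all.length + 1) ref_all pc.2 = true := by
              intro pc hpc
              obtain ⟨x, hx, rfl⟩ := List.mem_map.mp hpc
              cases hn : ref_all.length with
              | zero =>
                rw [hn] at hokf
                replace hokf : (ref_all.lookup fname).isNone = true := hokf
                rw [hl] at hokf; simp at hokf
              | succ m =>
                rw [hn] at hokf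
                simp only [okRef, hl, List.all_eq_true] at hokf
                exact okRef_le (by omega) (hokf x hx)
            have hdfs := dfsLoop_eq_foldl_emit (ref_all := ref_all) (fa := ref_all.length + 1)
              (((k :: ks).map (cnt (ref_all.length + 1) ref_all)).sum)
              ((k :: ks).map (fun c => (fname_src ++ "\t" ++ fname, c))) st hok
              (by rw [List.map_map]; exact Nat.le_refl _)
            rw [hdfs]
            have hwalk : walk_ref (ref_all.length + 2) ref_all (ref_text fname_src fname) (k :: ks)
                = (k :: ks).flatMap
                    (fun ref => emitFrame (ref_all.length + 1) ref_all (ref_text fname_src fname) ref) :=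
              walk_succ_flatMap (List.cons_ne_nil k ks)
            rw [hwalk]
            have hmm : ((k :: ks).map (fun c => (fname_src ++ "\t" ++ fname, c))).flatMap
                  (fun pc => emitFrame (ref_all.length + 1) ref_all pc.1 pc.2)
                = (k :: ks).flatMap
                    (fun ref => emitFrame (ref_all.length + 1) ref_all (ref_text fname_src fname) ref) := by
              rw [List.flatMap_def, List.map_map, ← List.flatMap_def]
              rfl
            rw [hmm]
            rfl
      rw [hfold]
      exact prune_items _ _
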